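/-
  THE INPUT STREAM, OGG PAGING AND THE BIT READER: the predicate `Bits` and the termination measure `μ`.
  (INVARIANTS.md §3.7: OB1, S1–S3, N1–N2, V1, μ; DECISIONS D-3, D-11, D-12, D-13; design/I1.md is the detailed source.)

  WHICH SOURCE. The FROZEN source (B's freeze-v4, FIX 20 = the remedy of DECISIONS §A U-5):
      getn:  if (n > z->stream_end - z->stream) { z->eof = 1; return 0; }              compares LENGTHS
      skip:  if (n > z->stream_end - z->stream) n = (int) (z->stream_end - z->stream);  never steps past the end
  so `stream_start ≤ stream ≤ stream_end` is a TRUE invariant of every state, and it is S3 here.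

  THE VOCABULARY is that of Vorbis/Blocks.lean (read its header first): `Blk : Block → Prop` "is an allocated block",
  `BlkLive Blk Live` (needed at a check site only), `Site Live a n` (the result of every USE lemma), `objBlock f`, `OB1`,
  `ObjEq` / `ObjSame` / `Copied`. No definition, structure or frame lemma of this file mentions the live set.

  WHAT IS HERE (`import Vorbis.Bits`, `open X86 X86.User Asan Vorbis`):

  1. `IN`, `IN_MAX`, `inBlock len`                     the input's address, its largest length, the input as a block
                                                       (`objBlock f`, the other object `Bits` talks about, is Vorbis/Blocks.lean's)
  2. `Bits Blk len mem f`                              ONE structure; ghost parameters: the block predicate and the input's length.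
        fields  OB1 OB1a OBR · S1 S2 S3 · N1 N2 · V1     (`h.N2`, `h.S3.2` …), stated through the accessors of Vorbis/Fields
        SHAPE clauses: `OB1 : Blk (objBlock f)`, `S2 : Blk (inBlock len)`
  3. USE   every lemma is `h.site_… hL … ha : Site Live a n` with `hL : BlkLive Blk Live`, a FREE address `a` and, last,
           `ha : a = …` (closed by `rfl` or `by simp only [vacc, voff]; omega`); then `s.acc hc`, `s.acc_addr hc`, `s.acc_range hc`,
           `s.has hc hL`, `s.inside hc`:
           Bits.site_field                                     any `[f + const]` site            (OB1)
           Bits.site_stream_byte                               get8's `load1 [old stream]`       (S1–S3 + the `jb`)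
           Bits.site_stream_range  (geometry: stream_contains) getn's memcpy source              (S1–S3 + the length test)
           Bits.site_segment                                   the two loops over `segments[i]`  (any spelling of the address)
           Bits.site_segment_next  (value: next_seg_index)     next_segment's `segments[next_seg]`   (N1, N2)
           Bits.site_segments_range (geometry: segments_contains)   getn's destination `f->segments`, n = segment_count   (N1)
           Bits.ptr_range  Bits.remaining_le                   all three pointers are in [200000H, 3FF000H]: nothing wraps
  4. FRAME Bits.wins               the windows of `*f` that `Bits` reads: `[48,72) [1488,1492) [1752,1756) [1768,1772)`
           Bits.transfer           THE two-address frame lemma: `ObjEq Bits.wins mem p mem' f` + OB1 / OBR of the target + the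
                                   input still allocated ⇒ `Bits Blk' len mem' f`.   (FRAME: `p = f`; TRANSPORT: `Copied`.)
           Bits.frame              the instance `ObjSame f mem mem'` (an allocator call, any store outside `*f`)
           Bits.reblk              another block predicate in which the two objects are still allocated (the one place where it
                                   really changes: `*f` is a stack object until `*f = p`)
           THERE IS NO `Bits.frame_decode`: decode-time code STORES `stream`, `next_seg`, `valid_bits` (they lie in the holes of
           `DecodeSame`); a packet-reading function RE-ESTABLISHES `Bits` after its own stores with 5. below, and carries it
           over everything else with the fine forms:
           Bits.of_fields · Bits.transfer_fields      `Bits` depends on six field values only (same address · two addresses)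
           Bits.SameFields         "the bytes of `*f` that `Bits` reads are unchanged"; `.of_same` `.of_writeLE` `.of_writeLE_word`
                                   `.of_sameExcept` `.refl` `.trans` · `.objEq` (it is `ObjEq Bits.wins` at one address)
           Bits.frame_fields       a store / a callee that leaves those bytes alone keeps `Bits`
           Bits.obj_disjoint_in · Bits.input_same_of_store_obj        the input is READ-ONLY: `*f` and the input do not meet (OBR)
  5. ESTABLISH / UPDATE   Bits.init (point P3) · Bits.update (new values of the four variable fields) ·
           Bits.store_stream · Bits.store_valid_bits · Bits.store_next_seg · Bits.store_segment_count · Bits.store_other ·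
           Bits.fields_store : KeptFields (one store inside `*f`: which of the seven fields keep their values)
  6. μ     muK muVal muOf mu · `mu_def` `muOf_def` · `mu_wf` · `mu_frame` `mu_frame_obj` `mu_transfer` (`muWins`) ·
           Bits.muK_le Bits.mu_lt ·
           Bits.mu_store_stream / _bytes_in_seg / _next_seg / _segment_count / _other   (μ after one store, as a pure `muOf`)
           pure lemmas over the field values before / after (all `omega`-level):
           muK_cases muK_le_255 · nextSeg nextSeg_N2 muK_nextSeg_lt · muOf_le_of_stream muOf_consumed muOf_dec_byte
           muOf_next_segment · muOf_spnc_bound (D-11) · muOf_lt_of_consumed muOf_after_capture (the COMPOSITIONS decrease)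
           muOf_set_B_zero muOf_lt_bound · and the example that start_page_no_capturepattern ALONE may increase μ
  7. the byte reader's arithmetic        addr_sub_addr · getn_fits · skipLen skipLen_le skipLen_fits skip_trunc32
  8. get_bits        GetBitsResult · get_bits_combine_lt · GetBitsResult.combine · mask_toNat and_mask_lt mask_and_lt ·
                     V1_get_bits_loop V1_get_bits_take V1_prep_huffman_loop ·
                     ReaderPost (refl, trans) · GetBitsPost · GetBitsPost.combine (the two-stage recursion: n ≤ 24, then n ≤ 32)
  Worked examples: Vorbis/BitsTest.lean.
-/
import Vorbis.Fields
namespace Vorbis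
open X86 X86.User Asan

/-! ### 1. The input -/

/-- The address of the input (`IN` of the memory map; S1). -/
@[voff] def IN : Nat := 0x200000

/-- The largest input length the theorem admits (S1: `0 ≤ len ≤ 1FF000H`). -/
@[voff] def IN_MAX : Nat := 0x1FF000

/-- The input: `len` bytes at `IN` (S2). An allocated READ-ONLY block: no store of the program targets it. -/
@[vblock] def inBlock (len : Nat) : Block := ⟨IN, len⟩

/-! ### 2. `Bits` -/

/-- **`Bits f`** (INVARIANTS §3.7): what every packet-reading primitive needs and keeps.
`Blk` is the ghost block predicate "is an allocated block" (Vorbis/Blocks.lean), `len` the ghost length of the input (a constant of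
the run). Clause names are those of INVARIANTS.md; `OBR` is an ADDITION: `*f` lies above the input and below the shadow — true of
both incarnations of the object (the stack object of stb_vorbis_open_memory, the arena copy) — which is what makes the input
read-only under stores to `*f`, and makes every address of `*f` a number below `2 ^ 64`. -/
structure Bits (Blk : Block → Prop) (len : Nat) (mem : Mem) (f : Nat) : Prop where
  /-- OB1: the 1808 bytes of `*f` are an allocated block. Every `[f + const]` check site. -/
  OB1 : Blk (objBlock f)
  /-- OB1: `f` is 8-aligned. -/
  OB1a : f % 8 = 0
  /-- (added) `*f` lies in `[400000H, C00000H)`: above the input, below the shadow. -/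
  OBR : 0x400000 ≤ f ∧ f + Off.sizeof.stb_vorbis ≤ 0xC00000
  /-- S1: `stream_start = IN`, `stream_end = IN + len`, `len ≤ 1FF000H`. Never written after stb_vorbis_open_memory. -/
  S1 : stb_vorbis.stream_start mem f = IN ∧ stb_vorbis.stream_end mem f = IN + len ∧ len ≤ IN_MAX
  /-- S2: the input bytes are an allocated block (and nothing ever stores to them: `inBlock len` is `Same` across every
  function). -/
  S2 : Blk (inBlock len)
  /-- S3 in the form of the frozen source (FIX 20): `stream_start ≤ stream ≤ stream_end`. -/
  S3 : stb_vorbis.stream_start mem f ≤ stb_vorbis.stream mem f ∧ stb_vorbis.stream mem f ≤ stb_vorbis.stream_end mem f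
  /-- N1: `0 ≤ segment_count ≤ 255`. -/
  N1 : 0 ≤ stb_vorbis.segment_count mem f ∧ stb_vorbis.segment_count mem f ≤ 255
  /-- N2: `next_seg = −1 ∨ next_seg = 0 ∨ 1 ≤ next_seg < segment_count`. -/
  N2 : stb_vorbis.next_seg mem f = -1 ∨ stb_vorbis.next_seg mem f = 0 ∨
    (1 ≤ stb_vorbis.next_seg mem f ∧ stb_vorbis.next_seg mem f < stb_vorbis.segment_count mem f)
  /-- V1: `−1 ≤ valid_bits ≤ 32` (`acc`: any value). -/
  V1 : -1 ≤ stb_vorbis.valid_bits mem f ∧ stb_vorbis.valid_bits mem f ≤ 32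

namespace Bits
variable {Blk Blk' : Block → Prop} {Live : Nat → Prop} {len : Nat} {mem mem' : Mem} {f : Nat}

/-! ### 3. USE: the check sites -/

/-- The three stream pointers as numbers: all inside `[200000H, 3FF000H]`, in order. No address computed from them wraps.
(A VALUE fact of S1, S3.) -/
theorem ptr_range (h : Bits Blk len mem f) :
    0x200000 = stb_vorbis.stream_start mem f ∧ stb_vorbis.stream_start mem f ≤ stb_vorbis.stream mem f ∧
      stb_vorbis.stream mem f ≤ stb_vorbis.stream_end mem f ∧ stb_vorbis.stream_end mem f ≤ 0x3FF000 := by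
  have h1 := h.S1
  have h3 := h.S3
  simp only [voff] at h1
  omega

/-- `R` of μ, the bytes left, is at most the input's length (so `int`-sized: skip's `(int) (stream_end - stream)`).
(A VALUE fact of S1, S3.) -/
theorem remaining_le (h : Bits Blk len mem f) :
    stb_vorbis.stream_end mem f - stb_vorbis.stream mem f ≤ len ∧ len ≤ 0x1FF000 := by
  have h1 := h.S1
  have h3 := h.S3
  simp only [voff] at h1
  omega

/-- **Any field of `*f`** (`[f + const]`, `const + n ≤ 1808`): the check site of OB1, for the 1-, 2-, 4-, 8-byte checks
(`s.acc hc`), the 16- and N-byte checks (`s.acc_range hc`) and the access that follows (`s.has hc hL`). -/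
theorem site_field (h : Bits Blk len mem f) (hL : BlkLive Blk Live) (off n : Nat) (ho : off + n ≤ 1808) (hn : 1 ≤ n)
    {a : Nat} (ha : a = f + off) : Site Live a n := by
  have hob : Vorbis.OB1 Blk f := ⟨h.OB1, h.OB1a⟩
  have hin : off + n ≤ Off.sizeof.stb_vorbis := by
    simp only [voff]
    exact ho
  exact hob.site hL off n hin hn ha

/-- **getn's memcpy source** (S1–S3), the geometry: after the length test (`n ≤ stream_end - stream`) the `n` bytes at `stream`
are inside the input (the form memcpy's contract wants: a range inside a block). -/
theorem stream_contains (h : Bits Blk len mem f) (n : Nat)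
    (hn : stb_vorbis.stream mem f + n ≤ stb_vorbis.stream_end mem f) : (inBlock len).contains (stb_vorbis.stream mem f) n := by
  have h1 := h.S1
  have h3 := h.S3
  show IN ≤ stb_vorbis.stream mem f ∧ stb_vorbis.stream mem f + n ≤ IN + len
  omega

/-- **getn's memcpy source** (S1–S3) as a check site: the `n ≥ 1` bytes at `stream`, after the length test. -/
theorem site_stream_range (h : Bits Blk len mem f) (hL : BlkLive Blk Live) (n : Nat)
    (hn : stb_vorbis.stream mem f + n ≤ stb_vorbis.stream_end mem f) (h1 : 1 ≤ n)
    {a : Nat} (ha : a = stb_vorbis.stream mem f) : Site Live a n := by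
  subst ha
  have hcont := h.stream_contains n hn
  exact Site.of_blk hL h.S2 hcont.1 hcont.2 h1

/-- **get8's `load1 [old stream]`** (S1–S3): after the `jb` (`stream < stream_end`) the byte is inside the input. -/
theorem site_stream_byte (h : Bits Blk len mem f) (hL : BlkLive Blk Live)
    (hlt : stb_vorbis.stream mem f < stb_vorbis.stream_end mem f)
    {a : Nat} (ha : a = stb_vorbis.stream mem f) : Site Live a 1 :=
  h.site_stream_range hL 1 (by omega) (by omega) ha

/-- **N2 as an index** (a VALUE fact of N1, N2): when `next_seg ≠ −1` it is an index of `segments[255]`. -/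
theorem next_seg_index (h : Bits Blk len mem f) (hne : stb_vorbis.next_seg mem f ≠ -1) :
    0 ≤ stb_vorbis.next_seg mem f ∧ stb_vorbis.next_seg mem f ≤ 254 := by
  have h1 := h.N1
  have h2 := h.N2
  omega

/-- **`segments[i]`**, `i < 255` (OB1): the two loops over the lacing values. The stepper leaves `[rbx + 0x5d4 + i]` as
`f + 1492 + i` and `[rbx + rbp*1 + 0x5d4]` as `f + i + 1492`: both are `ha`, by `by simp only [voff]; omega`. -/
theorem site_segment (h : Bits Blk len mem f) (hL : BlkLive Blk Live) (i : Nat) (hi : i < 255)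
    {a : Nat} (ha : a = f + Off.stb_vorbis.segments + i) : Site Live a 1 := by
  apply h.site_field hL (Off.stb_vorbis.segments + i) 1
  · simp only [voff]
    omega
  · omega
  · omega

/-- **next_segment's `load1 [rbx + sext(next_seg) + 0x5d4]`** (N1, N2; reached with `next_seg ≠ −1`). With `word_nonneg` the
sign-extended index is `addr (next_seg).toNat`, and `vfield` leaves `addr (f + (next_seg).toNat + 1492)`: that spelling is
`ha`, by `by simp only [voff]; omega`. -/
theorem site_segment_next (h : Bits Blk len mem f) (hL : BlkLive Blk Live) (hne : stb_vorbis.next_seg mem f ≠ -1)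
    {a : Nat} (ha : a = f + Off.stb_vorbis.segments + (stb_vorbis.next_seg mem f).toNat) : Site Live a 1 := by
  have hi := h.next_seg_index hne
  exact h.site_segment hL (stb_vorbis.next_seg mem f).toNat (by omega) ha

/-- **getn's destination** `f->segments`, `n = segment_count ≤ 255` (N1), the geometry: inside `*f`, and it ends at or below
`page_flag`. -/
theorem segments_contains (f n : Nat) (hn : n ≤ 255) :
    (objBlock f).contains (f + Off.stb_vorbis.segments) n ∧
      f + Off.stb_vorbis.segments + n ≤ f + Off.stb_vorbis.page_flag := by
  show (f ≤ f + Off.stb_vorbis.segments ∧ f + Off.stb_vorbis.segments + n ≤ f + Off.sizeof.stb_vorbis) ∧ _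
  simp only [voff]
  omega

/-- **getn's destination** as a check site (`1 ≤ n`; for `n = 0` memcpy touches nothing). -/
theorem site_segments_range (h : Bits Blk len mem f) (hL : BlkLive Blk Live) (n : Nat) (hn : n ≤ 255) (h1 : 1 ≤ n)
    {a : Nat} (ha : a = f + Off.stb_vorbis.segments) : Site Live a n := by
  apply h.site_field hL Off.stb_vorbis.segments n
  · simp only [voff]
    omega
  · exact h1
  · exact ha

/-! ### 4. FRAME -/

/-- **The windows of `*f` that `Bits` reads**: `stream`, `stream_start`, `stream_end` (`[48, 72)`), `segment_count`
(`[1488, 1492)`), `next_seg` (`[1752, 1756)`), `valid_bits` (`[1768, 1772)`). Numerals, so that `by decide` proves `InWins`;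
the two examples below fail when the layout moves. -/
def wins : Wins := [(48, 72), (1488, 1492), (1752, 1756), (1768, 1772)]

/-- `Bits.wins` against the generated offsets: the first and last field of each window. -/
example : wins = [(Off.stb_vorbis.stream, Off.stb_vorbis.stream_end + 8),
    (Off.stb_vorbis.segment_count, Off.stb_vorbis.segment_count + 4),
    (Off.stb_vorbis.next_seg, Off.stb_vorbis.next_seg + 4),
    (Off.stb_vorbis.valid_bits, Off.stb_vorbis.valid_bits + 4)] := by
  simp only [voff]
  rfl

/-- The three pointers of the first window are adjacent: `stream`, `stream_start`, `stream_end`. -/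
example : Off.stb_vorbis.stream + 8 = Off.stb_vorbis.stream_start ∧
    Off.stb_vorbis.stream_start + 8 = Off.stb_vorbis.stream_end := by
  decide

/-- **`Bits` depends on six field values only, at two addresses**: the fields of `(mem', f)` have the values of `(mem, p)`; the
ghost facts of the target (OB1, OBR, the input still allocated) are given. The core of `Bits.transfer` and `Bits.of_fields`;
a worker uses one of those two. -/
theorem transfer_fields {p : Nat} (h : Bits Blk len mem p) (hob : Vorbis.OB1 Blk' f)
    (hr : 0x400000 ≤ f ∧ f + Off.sizeof.stb_vorbis ≤ 0xC00000) (hin : Blk' (inBlock len))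
    (e1 : stb_vorbis.stream_start mem' f = stb_vorbis.stream_start mem p)
    (e2 : stb_vorbis.stream_end mem' f = stb_vorbis.stream_end mem p)
    (e3 : stb_vorbis.stream mem' f = stb_vorbis.stream mem p)
    (e4 : stb_vorbis.segment_count mem' f = stb_vorbis.segment_count mem p)
    (e5 : stb_vorbis.next_seg mem' f = stb_vorbis.next_seg mem p)
    (e6 : stb_vorbis.valid_bits mem' f = stb_vorbis.valid_bits mem p) : Bits Blk' len mem' f := by
  constructor
  · exact hob.blk
  · exact hob.aligned
  · exact hr
  · rw [e1, e2]
    exact h.S1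
  · exact hin
  · rw [e1, e2, e3]
    exact h.S3
  · rw [e4]
    exact h.N1
  · rw [e4, e5]
    exact h.N2
  · rw [e6]
    exact h.V1

/-- **`Bits` depends on six field values only** (and on the ghost state): same address, same block predicate. -/
theorem of_fields (h : Bits Blk len mem f)
    (e1 : stb_vorbis.stream_start mem' f = stb_vorbis.stream_start mem f)
    (e2 : stb_vorbis.stream_end mem' f = stb_vorbis.stream_end mem f)
    (e3 : stb_vorbis.stream mem' f = stb_vorbis.stream mem f)
    (e4 : stb_vorbis.segment_count mem' f = stb_vorbis.segment_count mem f)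
    (e5 : stb_vorbis.next_seg mem' f = stb_vorbis.next_seg mem f)
    (e6 : stb_vorbis.valid_bits mem' f = stb_vorbis.valid_bits mem f) : Bits Blk len mem' f :=
  h.transfer_fields ⟨h.OB1, h.OB1a⟩ h.OBR h.S2 e1 e2 e3 e4 e5 e6

/-- **THE TWO-ADDRESS FRAME LEMMA of `Bits`.** The windows `Bits.wins` of the object at `f` in `mem'` read as those of the object
at `p` in `mem`; the target is an allocated 8-aligned block (OB1) inside `[400000H, C00000H)` (OBR), and the input is still
allocated. `Bits` reads no block content (S2 is ghost) — no `hk`; the two blocks it mentions are the object itself, which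
CHANGES with the address, and the input, which does not depend on `(mem, f)` — so they are the explicit `hob`, `hin` instead of
an `Owns` predicate. FRAME is the instance `p = f` (`Bits.frame`), TRANSPORT through `*f = p` the instance
`ObjEq.of_copied hcp (by decide)` / `hm.objEq (by decide)` of a `Move`, with `hm.ob1`, `hm.range`. -/
theorem transfer {p : Nat} (h : Bits Blk len mem p) (he : ObjEq wins mem p mem' f) (hob : Vorbis.OB1 Blk' f)
    (hr : 0x400000 ≤ f ∧ f + Off.sizeof.stb_vorbis ≤ 0xC00000) (hin : Blk' (inBlock len)) : Bits Blk' len mem' f := by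
  apply h.transfer_fields hob hr hin
  · simp only [vacc, voff]
    exact he.u64 56 (by decide)
  · simp only [vacc, voff]
    exact he.u64 64 (by decide)
  · simp only [vacc, voff]
    exact he.u64 48 (by decide)
  · simp only [vacc, voff]
    exact he.i32 1488 (by decide)
  · simp only [vacc, voff]
    exact he.i32 1752 (by decide)
  · simp only [vacc, voff]
    exact he.i32 1768 (by decide)

/-- **THE FRAME LEMMA**: everything of `*f` except `setup_offset` / `temp_offset` reads the same (an allocator call; a store
outside the decoder object: `ObjSame.of_writeLE`, `ObjSame.of_sameExcept`, `ObjSame.of_same`) ⇒ `Bits` is kept (the input is not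
even read by it: S2 is ghost). There is NO `frame_decode` from `DecodeSame`: `stream`, `next_seg`, `valid_bits` are stored by
decode-time code; use `Bits.frame_fields` / `Bits.update` / the `Bits.store_…` lemmas there. -/
theorem frame (h : Bits Blk len mem f) (hs : ObjSame f mem mem') : Bits Blk len mem' f :=
  h.transfer (hs.sub (by decide)) ⟨h.OB1, h.OB1a⟩ h.OBR h.S2

/-- **Another block predicate** in which the two objects are still allocated. The one place where the block predicate of `Bits`
really changes: `*f` is a stack object of stb_vorbis_open_memory until `*f = p`, an arena block afterwards; a frame pushed or
popped, an allocation. -/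
theorem reblk (h : Bits Blk len mem f) (hob : Blk' (objBlock f)) (hin : Blk' (inBlock len)) : Bits Blk' len mem f :=
  h.transfer (ObjEq.refl wins mem f) ⟨hob, h.OB1a⟩ h.OBR hin

/-- **The bytes of `*f` that `Bits` reads are the same in `mem'`**: `stream stream_start stream_end` (`[f+48, f+72)`),
`segment_count`, `next_seg`, `valid_bits`. Everything else of `*f` may change (eof, error, the page fields, `segments[]`,
`bytes_in_seg`, `last_seg`, `acc`, `packet_bytes` …). The `EqOn` form of `ObjEq Bits.wins mem f mem' f` (`SameFields.objEq`),
with the constructors a packet-reading function needs for ITS stores. -/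
structure SameFields (mem mem' : Mem) (f : Nat) : Prop where
  streams : Mem.EqOn (f + 48) (f + 72) mem mem'
  segment_count : Mem.EqOn (f + 1488) (f + 1492) mem mem'
  next_seg : Mem.EqOn (f + 1752) (f + 1756) mem mem'
  valid_bits : Mem.EqOn (f + 1768) (f + 1772) mem mem'

/-- The whole object unchanged. -/
theorem SameFields.of_same (hs : (objBlock f).Same mem mem') : SameFields mem mem' f := by
  have hs' : Mem.EqOn f (f + 1808) mem mem' := hs
  constructor
  · exact Mem.EqOn.mono hs' (by omega) (by omega)
  · exact Mem.EqOn.mono hs' (by omega) (by omega)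
  · exact Mem.EqOn.mono hs' (by omega) (by omega)
  · exact Mem.EqOn.mono hs' (by omega) (by omega)

/-- Nothing changed. -/
theorem SameFields.refl (mem : Mem) (f : Nat) : SameFields mem mem f :=
  ⟨Mem.EqOn.refl _ _ _, Mem.EqOn.refl _ _ _, Mem.EqOn.refl _ _ _, Mem.EqOn.refl _ _ _⟩

/-- One step further. -/
theorem SameFields.trans {mem'' : Mem} (h1 : SameFields mem mem' f) (h2 : SameFields mem' mem'' f) :
    SameFields mem mem'' f :=
  ⟨h1.streams.trans h2.streams, h1.segment_count.trans h2.segment_count, h1.next_seg.trans h2.next_seg,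
    h1.valid_bits.trans h2.valid_bits⟩

/-- **One store of the walker at a word `w`** (`writeLE (rsp + 8) 4 v`: a spill, a push, a store through a pointer register)
whose bytes `[w, w + k)` miss the four windows. -/
theorem SameFields.of_writeLE_word (mem : Mem) (f : Nat) (w : Word) (k v : Nat) (hw : w.toNat + k ≤ 2 ^ 64)
    (h1 : w.toNat + k ≤ f + 48 ∨ f + 72 ≤ w.toNat) (h2 : w.toNat + k ≤ f + 1488 ∨ f + 1492 ≤ w.toNat)
    (h3 : w.toNat + k ≤ f + 1752 ∨ f + 1756 ≤ w.toNat) (h4 : w.toNat + k ≤ f + 1768 ∨ f + 1772 ≤ w.toNat) :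
    SameFields mem (mem.writeLE w k v) f := by
  constructor
  · exact Mem.eqOn_writeLE mem w k v (f + 48) 24 hw (by omega)
  · exact Mem.eqOn_writeLE mem w k v (f + 1488) 4 hw (by omega)
  · exact Mem.eqOn_writeLE mem w k v (f + 1752) 4 hw (by omega)
  · exact Mem.eqOn_writeLE mem w k v (f + 1768) 4 hw (by omega)

/-- **One store of the walker at a number address**, `writeLE (addr a) k v`, whose bytes `[a, a + k)` miss the four windows
(a store to another field of `*f`, to the arena, to the output). -/
theorem SameFields.of_writeLE (mem : Mem) (f a k v : Nat) (ha : a + k ≤ 2 ^ 64)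
    (h1 : a + k ≤ f + 48 ∨ f + 72 ≤ a) (h2 : a + k ≤ f + 1488 ∨ f + 1492 ≤ a)
    (h3 : a + k ≤ f + 1752 ∨ f + 1756 ≤ a) (h4 : a + k ≤ f + 1768 ∨ f + 1772 ≤ a) :
    SameFields mem (mem.writeLE (addr a) k v) f := by
  by_cases hk : k = 0
  · subst hk
    exact SameFields.refl mem f
  · have e : (addr a).toNat = a := toNat_addr a (by omega)
    exact SameFields.of_writeLE_word mem f (addr a) k v (by omega) (by omega) (by omega) (by omega) (by omega)

/-- **A callee's footprint** (`Mem.SameExcept`, the `Returned` of UserX/Contract.lean) none of whose windows meets the four. -/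
theorem SameFields.of_sameExcept {ws : List Span} (hs : Mem.SameExcept ws mem mem')
    (h1 : ∀ w, w ∈ ws → f + 72 ≤ w.lo ∨ w.hi ≤ f + 48) (h2 : ∀ w, w ∈ ws → f + 1492 ≤ w.lo ∨ w.hi ≤ f + 1488)
    (h3 : ∀ w, w ∈ ws → f + 1756 ≤ w.lo ∨ w.hi ≤ f + 1752) (h4 : ∀ w, w ∈ ws → f + 1772 ≤ w.lo ∨ w.hi ≤ f + 1768) :
    SameFields mem mem' f :=
  ⟨hs.eqOn _ _ h1, hs.eqOn _ _ h2, hs.eqOn _ _ h3, hs.eqOn _ _ h4⟩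

/-- **`SameFields` is `ObjEq Bits.wins` at one address** (the object does not wrap: OBR). -/
theorem SameFields.objEq (hs : SameFields mem mem' f) (hf : f + 1808 ≤ 2 ^ 64) : ObjEq wins mem f mem' f := by
  apply ObjEq.of_eqOn
  · intro w hw
    simp only [wins, List.mem_cons, List.mem_nil_iff, or_false] at hw
    rcases hw with rfl | rfl | rfl | rfl <;> simp only [] <;> omega
  · intro w hw
    simp only [wins, List.mem_cons, List.mem_nil_iff, or_false] at hw
    rcases hw with rfl | rfl | rfl | rfl
    · exact hs.streams
    · exact hs.segment_count
    · exact hs.next_seg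
    · exact hs.valid_bits

/-- **THE FRAME LEMMA** (fine form): the bytes `Bits` reads are unchanged ⇒ `Bits` is kept. What a packet-reading function
uses for a store of its own to another field of `*f`, a spill, a callee's footprint. -/
theorem frame_fields (h : Bits Blk len mem f) (hs : SameFields mem mem' f) : Bits Blk len mem' f := by
  have hr := h.OBR
  simp only [voff] at hr
  exact h.transfer (hs.objEq (by omega)) ⟨h.OB1, h.OB1a⟩ h.OBR h.S2

/-- **`*f` and the input do not meet** (OBR and S1: numbers only). -/
theorem obj_disjoint_in (h : Bits Blk len mem f) : (inBlock len).disjoint (objBlock f) := by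
  have h1 := h.S1
  have hr := h.OBR
  simp only [voff] at h1
  show IN + len ≤ f ∨ f + Off.sizeof.stb_vorbis ≤ IN
  simp only [voff]
  omega

/-- **The input is read-only under a store to `*f`**: the form in which S2's "no store targets IN" is carried. For a store
into any other block `C` use `Block.Same.of_writeLE` with `C` disjoint from `inBlock len` (stack, arena, output: all above
400000H). -/
theorem input_same_of_store_obj (h : Bits Blk len mem f) (a k v : Nat) (hc : (objBlock f).contains a k) :
    (inBlock len).Same mem (mem.writeLE (addr a) k v) := by
  have hr := h.OBR
  apply Block.Same.of_writeLE mem a k v h.obj_disjoint_in hc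
  show f + Off.sizeof.stb_vorbis ≤ 2 ^ 64
  omega

/-! ### 5. ESTABLISH and UPDATE -/

/-- **Point P3** (stb_vorbis_open_memory after `vorbis_init(&p, alloc)` and the five stream stores): `Bits` holds with
`stream = stream_start`, the paging and bit fields 0 (H0). -/
theorem init (hO : Blk (objBlock f)) (hal : f % 8 = 0) (hr : 0x400000 ≤ f ∧ f + Off.sizeof.stb_vorbis ≤ 0xC00000)
    (hI : Blk (inBlock len)) (hlen : len ≤ IN_MAX)
    (e1 : stb_vorbis.stream_start mem f = IN) (e2 : stb_vorbis.stream_end mem f = IN + len)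
    (e3 : stb_vorbis.stream mem f = IN) (e4 : stb_vorbis.segment_count mem f = 0)
    (e5 : stb_vorbis.next_seg mem f = 0) (e6 : stb_vorbis.valid_bits mem f = 0) : Bits Blk len mem f := by
  constructor
  · exact hO
  · exact hal
  · exact hr
  · exact ⟨e1, e2, hlen⟩
  · exact hI
  · rw [e1, e2, e3]
    omega
  · rw [e4]
    omega
  · rw [e5]
    exact Or.inr (Or.inl rfl)
  · rw [e6]
    omega

/-- **New values of the variable fields.** `stream_start` / `stream_end` keep their values; the four clauses about `stream`,
`segment_count`, `next_seg`, `valid_bits` are shown for the new memory. -/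
theorem update (h : Bits Blk len mem f)
    (e1 : stb_vorbis.stream_start mem' f = stb_vorbis.stream_start mem f)
    (e2 : stb_vorbis.stream_end mem' f = stb_vorbis.stream_end mem f)
    (hS3 : stb_vorbis.stream_start mem f ≤ stb_vorbis.stream mem' f ∧ stb_vorbis.stream mem' f ≤ stb_vorbis.stream_end mem f)
    (hN1 : 0 ≤ stb_vorbis.segment_count mem' f ∧ stb_vorbis.segment_count mem' f ≤ 255)
    (hN2 : stb_vorbis.next_seg mem' f = -1 ∨ stb_vorbis.next_seg mem' f = 0 ∨
      (1 ≤ stb_vorbis.next_seg mem' f ∧ stb_vorbis.next_seg mem' f < stb_vorbis.segment_count mem' f))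
    (hV1 : -1 ≤ stb_vorbis.valid_bits mem' f ∧ stb_vorbis.valid_bits mem' f ≤ 32) : Bits Blk len mem' f := by
  constructor
  · exact h.OB1
  · exact h.OB1a
  · exact h.OBR
  · rw [e1, e2]
    exact h.S1
  · exact h.S2
  · rw [e1, e2]
    exact hS3
  · exact hN1
  · exact hN2
  · exact hV1

/-- The number a field address of `*f` stands for: `(addr (f + off)).toNat = f + off`. -/
theorem toNat_addr_field (h : Bits Blk len mem f) (off : Nat) (ho : off ≤ 1808) : (addr (f + off)).toNat = f + off := by
  have hr := h.OBR
  simp only [voff] at hr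
  exact toNat_addr _ (by omega)

/-- **What a store to the bytes `[f + off, f + off + k)` of `*f` leaves alone**: each of the seven fields that `Bits` and μ
read keeps its value when the store misses its bytes. -/
structure KeptFields (mem mem' : Mem) (f off k : Nat) : Prop where
  stream : off + k ≤ 48 ∨ 56 ≤ off → stb_vorbis.stream mem' f = stb_vorbis.stream mem f
  stream_start : off + k ≤ 56 ∨ 64 ≤ off → stb_vorbis.stream_start mem' f = stb_vorbis.stream_start mem f
  stream_end : off + k ≤ 64 ∨ 72 ≤ off → stb_vorbis.stream_end mem' f = stb_vorbis.stream_end mem f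
  segment_count : off + k ≤ 1488 ∨ 1492 ≤ off → stb_vorbis.segment_count mem' f = stb_vorbis.segment_count mem f
  bytes_in_seg : off + k ≤ 1748 ∨ 1749 ≤ off → stb_vorbis.bytes_in_seg mem' f = stb_vorbis.bytes_in_seg mem f
  next_seg : off + k ≤ 1752 ∨ 1756 ≤ off → stb_vorbis.next_seg mem' f = stb_vorbis.next_seg mem f
  valid_bits : off + k ≤ 1768 ∨ 1772 ≤ off → stb_vorbis.valid_bits mem' f = stb_vorbis.valid_bits mem f

/-- **One store inside `*f`, `writeLE (addr (f + off)) k v`**: the fields it misses keep their values. (The generic helper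
behind the `store_…` and `mu_store_…` lemmas; use it directly for a store they do not cover.) -/
theorem fields_store (h : Bits Blk len mem f) (off k v : Nat) (ho : off + k ≤ 1808) :
    KeptFields mem (mem.writeLE (addr (f + off)) k v) f off k := by
  have ea := h.toNat_addr_field off (by omega)
  have hr := h.OBR
  simp only [voff] at hr
  constructor
  · intro hd
    simp only [vacc, voff]
    exact Mem.u64_writeLE mem _ k v _ (by omega) (by omega) (by omega)
  · intro hd
    simp only [vacc, voff]
    exact Mem.u64_writeLE mem _ k v _ (by omega) (by omega) (by omega)
  · intro hd
    simp only [vacc, voff]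
    exact Mem.u64_writeLE mem _ k v _ (by omega) (by omega) (by omega)
  · intro hd
    simp only [vacc, voff]
    exact Mem.i32_writeLE mem _ k v _ (by omega) (by omega) (by omega)
  · intro hd
    simp only [vacc, voff]
    exact Mem.u8_writeLE mem _ k v _ (by omega) (by omega) (by omega)
  · intro hd
    simp only [vacc, voff]
    exact Mem.i32_writeLE mem _ k v _ (by omega) (by omega) (by omega)
  · intro hd
    simp only [vacc, voff]
    exact Mem.i32_writeLE mem _ k v _ (by omega) (by omega) (by omega)

/-- **`mov [rbx + 0x30], rax`: the store of a new `stream`** (get8: `+1` under `stream < stream_end`; getn: `+n` under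
`n ≤ stream_end − stream`; skip: `+ min(n, stream_end − stream)`). The value is a number inside the input. -/
theorem store_stream (h : Bits Blk len mem f) (s : Nat) (h1 : stb_vorbis.stream_start mem f ≤ s)
    (h2 : s ≤ stb_vorbis.stream_end mem f) :
    Bits Blk len (mem.writeLE (addr (f + 48)) 8 s) f ∧ stb_vorbis.stream (mem.writeLE (addr (f + 48)) 8 s) f = s := by
  have hp := h.ptr_range
  have ho := h.fields_store 48 8 s (by omega)
  have es : stb_vorbis.stream (mem.writeLE (addr (f + 48)) 8 s) f = s := by
    simp only [vacc, voff]
    rw [Mem.u64_writeLE_same]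
    exact Nat.mod_eq_of_lt (by omega)
  refine ⟨?_, es⟩
  apply h.update (ho.stream_start (by omega)) (ho.stream_end (by omega))
  · rw [es]
    exact ⟨h1, h2⟩
  · rw [ho.segment_count (by omega)]
    exact h.N1
  · rw [ho.segment_count (by omega), ho.next_seg (by omega)]
    exact h.N2
  · rw [ho.valid_bits (by omega)]
    exact h.V1

/-- **A store to a part of `*f` that `Bits` does not read** (`eof`, `error`, `acc`, `bytes_in_seg`, `last_seg`,
`packet_bytes`, the page fields, `segments[i]` …): `[off, off + k)` inside the object and off the four windows. -/
theorem store_other (h : Bits Blk len mem f) (off k v : Nat) (ho : off + k ≤ 1808)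
    (h1 : off + k ≤ 48 ∨ 72 ≤ off) (h2 : off + k ≤ 1488 ∨ 1492 ≤ off)
    (h3 : off + k ≤ 1752 ∨ 1756 ≤ off) (h4 : off + k ≤ 1768 ∨ 1772 ≤ off) :
    Bits Blk len (mem.writeLE (addr (f + off)) k v) f := by
  have hr := h.OBR
  simp only [voff] at hr
  apply h.frame_fields
  exact SameFields.of_writeLE mem f (f + off) k v (by omega) (by omega) (by omega) (by omega) (by omega)

/-- **`mov [rbx + 0x6e8], r32`: a store of `valid_bits`** (the stored value as the stepper has it: the number of a 32-bit
vector `x`; its signed value must satisfy V1). -/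
theorem store_valid_bits (h : Bits Blk len mem f) (x : BitVec 32) (hx : -1 ≤ x.toInt ∧ x.toInt ≤ 32) :
    Bits Blk len (mem.writeLE (addr (f + 1768)) 4 x.toNat) f ∧
      stb_vorbis.valid_bits (mem.writeLE (addr (f + 1768)) 4 x.toNat) f = x.toInt := by
  have ho := h.fields_store 1768 4 x.toNat (by omega)
  have es : stb_vorbis.valid_bits (mem.writeLE (addr (f + 1768)) 4 x.toNat) f = x.toInt := by
    simp only [vacc, voff]
    exact Mem.i32_writeLE_same_bv mem _ x
  refine ⟨?_, es⟩
  apply h.update (ho.stream_start (by omega)) (ho.stream_end (by omega))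
  · rw [ho.stream (by omega)]
    exact h.S3
  · rw [ho.segment_count (by omega)]
    exact h.N1
  · rw [ho.segment_count (by omega), ho.next_seg (by omega)]
    exact h.N2
  · rw [es]
    exact hx

/-- **`mov [rbx + 0x6d8], r32`: a store of `next_seg`**; the new value must satisfy N2 against the current
`segment_count`. (next_segment stores `next_seg + 1` FIRST and corrects it to −1 afterwards: between the two stores N2 may be
violated — no callee that needs `Bits` runs in between; prove `Bits` again at the second store or at the join.) -/
theorem store_next_seg (h : Bits Blk len mem f) (x : BitVec 32)
    (hx : x.toInt = -1 ∨ x.toInt = 0 ∨ (1 ≤ x.toInt ∧ x.toInt < stb_vorbis.segment_count mem f)) :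
    Bits Blk len (mem.writeLE (addr (f + 1752)) 4 x.toNat) f ∧
      stb_vorbis.next_seg (mem.writeLE (addr (f + 1752)) 4 x.toNat) f = x.toInt := by
  have ho := h.fields_store 1752 4 x.toNat (by omega)
  have es : stb_vorbis.next_seg (mem.writeLE (addr (f + 1752)) 4 x.toNat) f = x.toInt := by
    simp only [vacc, voff]
    exact Mem.i32_writeLE_same_bv mem _ x
  refine ⟨?_, es⟩
  apply h.update (ho.stream_start (by omega)) (ho.stream_end (by omega))
  · rw [ho.stream (by omega)]
    exact h.S3
  · rw [ho.segment_count (by omega)]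
    exact h.N1
  · rw [ho.segment_count (by omega), es]
    exact hx
  · rw [ho.valid_bits (by omega)]
    exact h.V1

/-- **`mov [rbx + 0x5d0], r32`: the store of `segment_count`** (start_page_no_capturepattern: a zero-extended byte). It is
entered with `next_seg ∈ {−1, 0}`, which is why N2 survives whatever the new count is. -/
theorem store_segment_count (h : Bits Blk len mem f) (x : BitVec 32) (hx : 0 ≤ x.toInt ∧ x.toInt ≤ 255)
    (hns : stb_vorbis.next_seg mem f = -1 ∨ stb_vorbis.next_seg mem f = 0) :
    Bits Blk len (mem.writeLE (addr (f + 1488)) 4 x.toNat) f ∧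
      stb_vorbis.segment_count (mem.writeLE (addr (f + 1488)) 4 x.toNat) f = x.toInt := by
  have ho := h.fields_store 1488 4 x.toNat (by omega)
  have es : stb_vorbis.segment_count (mem.writeLE (addr (f + 1488)) 4 x.toNat) f = x.toInt := by
    simp only [vacc, voff]
    exact Mem.i32_writeLE_same_bv mem _ x
  refine ⟨?_, es⟩
  apply h.update (ho.stream_start (by omega)) (ho.stream_end (by omega))
  · rw [ho.stream (by omega)]
    exact h.S3
  · rw [es]
    exact hx
  · rw [ho.next_seg (by omega)]
    omega
  · rw [ho.valid_bits (by omega)]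
    exact h.V1

end Bits

/-! ### 6. The termination measure μ

`μ = R·2^16 + K·2^8 + B` with `R = stream_end −ℕ stream` (the bytes left), `B = bytes_in_seg`,
`K = next_seg = −1 ? 0 : next_seg < segment_count ? segment_count − next_seg : 1` (the segments left in the page).
It is lexicographic because `B ≤ 255` and `K ≤ 255` (N1, N2).

**Lemma μ, in the corrected form of DECISIONS D-11.**
 * a `get8_packet_raw` that returns a byte decreases μ STRICTLY (`muOf_dec_byte`; through `next_segment`:
   `muOf_next_segment`, or after a page start `muOf_after_capture`);
 * get8, get32, getn, skip, capture_pattern move only `stream`, forward: `muOf_le_of_stream`;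
 * next_segment, get8_packet(_raw), get32_packet, get_bits, prep_huffman, flush_packet, start_packet, maybe_start_packet,
   start_page never increase μ (compositions of the above);
 * **start_page_no_capturepattern ALONE may increase μ** (the `example` below): its post is the BOUND `muOf_spnc_bound`,
   `μ′ + 2^16·(bytes consumed) ≤ μ + 255·2^8`; the COMPOSITIONS — start_page after a successful capture_pattern,
   maybe_start_packet after its four matching get8 — have consumed 4 real bytes first and decrease strictly:
   `muOf_after_capture`. (start_decoder's two direct start_page calls go through capture_pattern as well.) -/

/-- `K` of μ: the segments left in the current page. -/
def muK (ns sc : Int) : Nat :=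
  if ns = -1 then 0 else if ns < sc then (sc - ns).toNat else 1

/-- `μ` from its three components. -/
def muVal (R K B : Nat) : Nat := R * 65536 + K * 256 + B

/-- `μ` from the five field values it depends on: `stream_end`, `stream`, `segment_count`, `next_seg`, `bytes_in_seg`. -/
def muOf (e s : Nat) (sc ns : Int) (b : Nat) : Nat := muVal (e - s) (muK ns sc) b

/-- **μ of a state.** -/
def mu (mem : Mem) (f : Nat) : Nat :=
  muOf (stb_vorbis.stream_end mem f) (stb_vorbis.stream mem f) (stb_vorbis.segment_count mem f)
    (stb_vorbis.next_seg mem f) (stb_vorbis.bytes_in_seg mem f)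

/-- Unfolds `mu` to the pure `muOf` of the field values. -/
theorem mu_def (mem : Mem) (f : Nat) :
    mu mem f = muOf (stb_vorbis.stream_end mem f) (stb_vorbis.stream mem f) (stb_vorbis.segment_count mem f)
      (stb_vorbis.next_seg mem f) (stb_vorbis.bytes_in_seg mem f) := id rfl

/-- Unfolds `muOf` to plain arithmetic (then `muK_cases` and `omega`). -/
theorem muOf_def (e s : Nat) (sc ns : Int) (b : Nat) : muOf e s sc ns b = (e - s) * 65536 + muK ns sc * 256 + b := id rfl

/-- **μ is a well-founded measure**: the relation "μ strictly smaller" on memories has no infinite descending chain. -/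
theorem mu_wf (f : Nat) : WellFounded (fun mem' mem : Mem => mu mem' f < mu mem f) :=
  (measure (fun mem : Mem => mu mem f)).wf

/-- The three cases of `K`, ready for `omega`. -/
theorem muK_cases (ns sc : Int) :
    (ns = -1 ∧ muK ns sc = 0) ∨ (ns ≠ -1 ∧ ns < sc ∧ (muK ns sc : Int) = sc - ns) ∨ (ns ≠ -1 ∧ sc ≤ ns ∧ muK ns sc = 1) := by
  unfold muK
  split
  · omega
  · split <;> omega

/-- `K ≤ 255` under N1 and N2. -/
theorem muK_le_255 (ns sc : Int) (hN1 : sc ≤ 255) (hN2 : ns = -1 ∨ ns = 0 ∨ (1 ≤ ns ∧ ns < sc)) : muK ns sc ≤ 255 := by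
  have h := muK_cases ns sc
  omega

/-- What next_segment does to `next_seg`: `len = segments[next_seg++]; if (next_seg >= segment_count) next_seg = -1`. -/
def nextSeg (ns sc : Int) : Int := if sc ≤ ns + 1 then -1 else ns + 1

/-- Both cases of `nextSeg`, for `omega`. -/
theorem nextSeg_cases (ns sc : Int) : (sc ≤ ns + 1 ∧ nextSeg ns sc = -1) ∨ (ns + 1 < sc ∧ nextSeg ns sc = ns + 1) := by
  unfold nextSeg
  split <;> omega

/-- next_segment keeps N2. -/
theorem nextSeg_N2 (ns sc : Int) (hN2 : ns = -1 ∨ ns = 0 ∨ (1 ≤ ns ∧ ns < sc)) (hne : ns ≠ -1) :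
    nextSeg ns sc = -1 ∨ nextSeg ns sc = 0 ∨ (1 ≤ nextSeg ns sc ∧ nextSeg ns sc < sc) := by
  have h := nextSeg_cases ns sc
  omega

/-- **Consuming a segment decreases `K`** (Lemma μ, case b; also the corner `next_seg = 0 ≥ segment_count`: 1 → 0). -/
theorem muK_nextSeg_lt (ns sc : Int) (hne : ns ≠ -1) :
    muK (nextSeg ns sc) sc < muK ns sc := by
  have h := nextSeg_cases ns sc
  have h1 := muK_cases ns sc
  have h2 := muK_cases (nextSeg ns sc) sc
  omega

/-- μ is monotone in its three components. -/
theorem muVal_le (R K B R' K' B' : Nat) (hR : R' ≤ R) (hK : K' ≤ K) (hB : B' ≤ B) : muVal R' K' B' ≤ muVal R K B := by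
  unfold muVal
  omega

/-- Lexicographic, last component. -/
theorem muVal_lt_B (R K B R' K' B' : Nat) (hR : R' ≤ R) (hK : K' ≤ K) (hB : B' < B) : muVal R' K' B' < muVal R K B := by
  unfold muVal
  omega

/-- Lexicographic, middle component (needs the new `B′ ≤ 255`: a byte). -/
theorem muVal_lt_K (R K B R' K' B' : Nat) (hR : R' ≤ R) (hK : K' < K) (hB : B' ≤ 255) : muVal R' K' B' < muVal R K B := by
  unfold muVal
  omega

/-- Lexicographic, first component (needs the new `K′ ≤ 255`, `B′ ≤ 255`). -/
theorem muVal_lt_R (R K B R' K' B' : Nat) (hR : R' < R) (hK : K' ≤ 255) (hB : B' ≤ 255) : muVal R' K' B' < muVal R K B := by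
  unfold muVal
  omega

/-- **get8, get32, getn, skip, capture_pattern**: only `stream` moves, forward ⇒ μ does not increase. -/
theorem muOf_le_of_stream (e s s' : Nat) (sc ns : Int) (b : Nat) (hs : s ≤ s') : muOf e s' sc ns b ≤ muOf e s sc ns b := by
  rw [muOf_def, muOf_def]
  omega

/-- The same with the number of bytes consumed: each real byte is worth `2^16`. -/
theorem muOf_consumed (e s s' c : Nat) (sc ns : Int) (b : Nat) (hs : s + c ≤ s') (he : s' ≤ e) :
    muOf e s' sc ns b + 65536 * c ≤ muOf e s sc ns b := by
  rw [muOf_def, muOf_def]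
  omega

/-- **get8_packet_raw with `bytes_in_seg ≥ 1`** (Lemma μ, case a): `B − 1`, `stream` the same or `+1` ⇒ strictly smaller. -/
theorem muOf_dec_byte (e s s' : Nat) (sc ns : Int) (b : Nat) (hb : 1 ≤ b) (hs : s ≤ s') :
    muOf e s' sc ns (b - 1) < muOf e s sc ns b := by
  rw [muOf_def, muOf_def]
  omega

/-- **next_segment without a page start** (Lemma μ, case b): `next_seg ≠ −1` on entry, one segment consumed, the new
`bytes_in_seg` is a byte ⇒ strictly smaller whatever `B` was. -/
theorem muOf_next_segment (e s s' : Nat) (sc ns : Int) (b b' : Nat) (hne : ns ≠ -1) (hb' : b' ≤ 255) (hs : s ≤ s') :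
    muOf e s' sc (nextSeg ns sc) b' < muOf e s sc ns b := by
  have hk := muK_nextSeg_lt ns sc hne
  rw [muOf_def, muOf_def]
  omega

/-- **start_page_no_capturepattern's post on μ (D-11): a BOUND, not a decrease.** `stream` moved forward by `s′ − s` bytes,
`bytes_in_seg` is untouched, and the new `K′ ≤ 255` (N1, N2 of the exit state, success or failure). -/
theorem muOf_spnc_bound (e s s' : Nat) (sc ns sc' ns' : Int) (b : Nat) (hs : s ≤ s') (he : s' ≤ e)
    (hK : muK ns' sc' ≤ 255) : muOf e s' sc' ns' b + 65536 * (s' - s) ≤ muOf e s sc ns b + 255 * 256 := by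
  rw [muOf_def, muOf_def]
  omega

/-- start_page_no_capturepattern ALONE may increase μ: entered with `next_seg = −1` at the end of the input (`stream =
stream_end`), every get8 returns 0, the version byte 0 passes, a 0-segment page is accepted, `next_seg := 0`: `K` 0 → 1. -/
example (e : Nat) : muOf e e 0 (-1) 0 = 0 ∧ muOf e e 0 0 0 = 256 := by
  constructor
  · rw [muOf_def]
    have h := muK_cases (-1) 0
    omega
  · rw [muOf_def]
    have h := muK_cases 0 0
    omega

/-- **Any step that consumed at least one real byte decreases μ strictly**, whatever it did to the paging fields, as long as
the new `K′, B′` are bytes. -/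
theorem muOf_lt_of_consumed (e s s' : Nat) (sc ns sc' ns' : Int) (b b' : Nat) (hs : s + 1 ≤ s') (he : s' ≤ e)
    (hK : muK ns' sc' ≤ 255) (hb : b' ≤ 255) : muOf e s' sc' ns' b' < muOf e s sc ns b := by
  rw [muOf_def, muOf_def]
  omega

/-- **The compositions decrease (D-11; Lemma μ, case c)**: start_page = capture_pattern (4 matching bytes: get8 returns 0
unless it advanced, and the four constants are non-zero) then start_page_no_capturepattern — success OR failure;
maybe_start_packet after its four get8; next_segment's page-start arm including the segment it then consumes. -/
theorem muOf_after_capture (e s s' : Nat) (sc ns sc' ns' : Int) (b b' : Nat) (hs : s + 4 ≤ s') (he : s' ≤ e)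
    (hK : muK ns' sc' ≤ 255) (hb : b' ≤ 255) : muOf e s' sc' ns' b' < muOf e s sc ns b :=
  muOf_lt_of_consumed e s s' sc ns sc' ns' b b' (by omega) he hK hb

/-- `bytes_in_seg = 0` (start_packet, maybe_start_packet, the skip loop of start_decoder) does not increase μ. -/
theorem muOf_set_B_zero (e s : Nat) (sc ns : Int) (b : Nat) : muOf e s sc ns 0 ≤ muOf e s sc ns b := by
  rw [muOf_def, muOf_def]
  omega

/-- The size of μ: below `(R + 1)·2^16`. (flush_packet's loop runs at most `μ + 1` times.) -/
theorem muOf_lt_bound (e s : Nat) (sc ns : Int) (b : Nat) (hK : muK ns sc ≤ 255) (hb : b ≤ 255) :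
    muOf e s sc ns b < (e - s + 1) * 65536 := by
  rw [muOf_def]
  omega

namespace Bits
variable {Blk : Block → Prop} {len : Nat} {mem mem' : Mem} {f : Nat}

/-- `K ≤ 255` in a state with `Bits`. -/
theorem muK_le (h : Bits Blk len mem f) : muK (stb_vorbis.next_seg mem f) (stb_vorbis.segment_count mem f) ≤ 255 :=
  muK_le_255 _ _ h.N1.2 h.N2

/-- μ of a state with `Bits` is below `(len + 1)·2^16 ≤ 1FF001H·2^16`. -/
theorem mu_lt (h : Bits Blk len mem f) : mu mem f < (len + 1) * 65536 := by
  have hk := h.muK_le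
  have hb : stb_vorbis.bytes_in_seg mem f ≤ 255 := by
    simp only [vacc, voff]
    have := mem.u8_lt (f + 1748)
    omega
  have hr := h.remaining_le
  rw [mu_def, muOf_def]
  generalize stb_vorbis.stream_end mem f - stb_vorbis.stream mem f = R at hr ⊢
  generalize muK (stb_vorbis.next_seg mem f) (stb_vorbis.segment_count mem f) = K at hk ⊢
  generalize stb_vorbis.bytes_in_seg mem f = B at hb ⊢
  omega

end Bits

namespace Bits
variable {Blk : Block → Prop} {len : Nat} {mem mem' : Mem} {f : Nat}

/-- **μ after the store of a new `stream`** (`mov [rbx + 0x30], rax`): the pure `muOf` with the new pointer. Combine with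
`muOf_le_of_stream` / `muOf_consumed`. -/
theorem mu_store_stream (h : Bits Blk len mem f) (s : Nat) (hs : s < 2 ^ 64) :
    mu (mem.writeLE (addr (f + 48)) 8 s) f =
      muOf (stb_vorbis.stream_end mem f) s (stb_vorbis.segment_count mem f) (stb_vorbis.next_seg mem f)
        (stb_vorbis.bytes_in_seg mem f) := by
  have ho := h.fields_store 48 8 s (by omega)
  have es : stb_vorbis.stream (mem.writeLE (addr (f + 48)) 8 s) f = s := by
    simp only [vacc, voff]
    rw [Mem.u64_writeLE_same]
    exact Nat.mod_eq_of_lt hs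
  rw [mu_def, es, ho.stream_end (by omega), ho.segment_count (by omega), ho.bytes_in_seg (by omega), ho.next_seg (by omega)]

/-- **μ after the store of `bytes_in_seg`** (`mov [rbx + 0x6d4], r8`: `--f->bytes_in_seg`, `f->bytes_in_seg = len`, `= 0`).
Combine with `muOf_dec_byte` / `muOf_next_segment` / `muOf_set_B_zero`. -/
theorem mu_store_bytes_in_seg (h : Bits Blk len mem f) (b : Nat) (hb : b < 256) :
    mu (mem.writeLE (addr (f + 1748)) 1 b) f =
      muOf (stb_vorbis.stream_end mem f) (stb_vorbis.stream mem f) (stb_vorbis.segment_count mem f)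
        (stb_vorbis.next_seg mem f) b := by
  have ho := h.fields_store 1748 1 b (by omega)
  have es : stb_vorbis.bytes_in_seg (mem.writeLE (addr (f + 1748)) 1 b) f = b := by
    simp only [vacc, voff]
    rw [Mem.u8_writeLE_same]
    exact Nat.mod_eq_of_lt hb
  rw [mu_def, es, ho.stream (by omega), ho.stream_end (by omega), ho.segment_count (by omega), ho.next_seg (by omega)]

/-- **μ after the store of `next_seg`** (`mov [rbx + 0x6d8], r32`). Combine with `muK_nextSeg_lt` / `muOf_next_segment`. -/
theorem mu_store_next_seg (h : Bits Blk len mem f) (x : BitVec 32) :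
    mu (mem.writeLE (addr (f + 1752)) 4 x.toNat) f =
      muOf (stb_vorbis.stream_end mem f) (stb_vorbis.stream mem f) (stb_vorbis.segment_count mem f) x.toInt
        (stb_vorbis.bytes_in_seg mem f) := by
  have ho := h.fields_store 1752 4 x.toNat (by omega)
  have es : stb_vorbis.next_seg (mem.writeLE (addr (f + 1752)) 4 x.toNat) f = x.toInt := by
    simp only [vacc, voff]
    exact Mem.i32_writeLE_same_bv mem _ x
  rw [mu_def, es, ho.stream (by omega), ho.stream_end (by omega), ho.segment_count (by omega), ho.bytes_in_seg (by omega)]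

/-- **μ after the store of `segment_count`** (`mov [rbx + 0x5d0], r32`). Combine with `muOf_spnc_bound`. -/
theorem mu_store_segment_count (h : Bits Blk len mem f) (x : BitVec 32) :
    mu (mem.writeLE (addr (f + 1488)) 4 x.toNat) f =
      muOf (stb_vorbis.stream_end mem f) (stb_vorbis.stream mem f) x.toInt (stb_vorbis.next_seg mem f)
        (stb_vorbis.bytes_in_seg mem f) := by
  have ho := h.fields_store 1488 4 x.toNat (by omega)
  have es : stb_vorbis.segment_count (mem.writeLE (addr (f + 1488)) 4 x.toNat) f = x.toInt := by
    simp only [vacc, voff]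
    exact Mem.i32_writeLE_same_bv mem _ x
  rw [mu_def, es, ho.stream (by omega), ho.stream_end (by omega), ho.bytes_in_seg (by omega), ho.next_seg (by omega)]

/-- **μ is unchanged by a store to any other part of `*f`** (eof, error, `acc`, `valid_bits`, `last_seg`, `packet_bytes`,
the page fields, `segments[i]` …): `[off, off + k)` misses `stream`, `stream_end`, `segment_count`, `bytes_in_seg`,
`next_seg`. -/
theorem mu_store_other (h : Bits Blk len mem f) (off k v : Nat) (ho : off + k ≤ 1808)
    (h1 : off + k ≤ 48 ∨ 56 ≤ off) (h2 : off + k ≤ 64 ∨ 72 ≤ off) (h3 : off + k ≤ 1488 ∨ 1492 ≤ off)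
    (h4 : off + k ≤ 1748 ∨ 1749 ≤ off) (h5 : off + k ≤ 1752 ∨ 1756 ≤ off) :
    mu (mem.writeLE (addr (f + off)) k v) f = mu mem f := by
  have hf := h.fields_store off k v ho
  rw [mu_def, mu_def, hf.stream h1, hf.stream_end h2, hf.segment_count h3, hf.bytes_in_seg h4, hf.next_seg h5]

end Bits

/-- **μ depends on five field values only**: `stream`, `stream_end` (inside `[f+48, f+72)`), `segment_count`, `next_seg`,
`bytes_in_seg`. -/
theorem mu_frame {mem mem' : Mem} {f : Nat} (hf : f + 1808 ≤ 2 ^ 64) (h1 : Mem.EqOn (f + 48) (f + 72) mem mem')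
    (h2 : Mem.EqOn (f + 1488) (f + 1492) mem mem') (h3 : Mem.EqOn (f + 1752) (f + 1756) mem mem')
    (h4 : Mem.EqOn (f + 1748) (f + 1749) mem mem') : mu mem' f = mu mem f := by
  have e1 : stb_vorbis.stream_end mem' f = stb_vorbis.stream_end mem f := by
    simp only [vacc, voff]
    exact h1.u64 _ (by omega) (by omega) (by omega)
  have e2 : stb_vorbis.stream mem' f = stb_vorbis.stream mem f := by
    simp only [vacc, voff]
    exact h1.u64 _ (by omega) (by omega) (by omega)
  have e3 : stb_vorbis.segment_count mem' f = stb_vorbis.segment_count mem f := by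
    simp only [vacc, voff]
    exact h2.i32 _ (by omega) (by omega) (by omega)
  have e4 : stb_vorbis.next_seg mem' f = stb_vorbis.next_seg mem f := by
    simp only [vacc, voff]
    exact h3.i32 _ (by omega) (by omega) (by omega)
  have e5 : stb_vorbis.bytes_in_seg mem' f = stb_vorbis.bytes_in_seg mem f := by
    simp only [vacc, voff]
    exact h4.u8 _ (by omega) (by omega) (by omega)
  rw [mu_def, mu_def, e1, e2, e3, e4, e5]

/-- μ is kept when the whole of `*f` is. -/
theorem mu_frame_obj {mem mem' : Mem} {f : Nat} (hf : f + 1808 ≤ 2 ^ 64) (hs : (objBlock f).Same mem mem') :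
    mu mem' f = mu mem f := by
  have hs' : Mem.EqOn f (f + 1808) mem mem' := hs
  apply mu_frame hf
  · exact Mem.EqOn.mono hs' (by omega) (by omega)
  · exact Mem.EqOn.mono hs' (by omega) (by omega)
  · exact Mem.EqOn.mono hs' (by omega) (by omega)
  · exact Mem.EqOn.mono hs' (by omega) (by omega)

/-- **The windows of `*f` that μ reads**: `stream` … `stream_end` (`[48, 72)`), `segment_count` (`[1488, 1492)`),
`bytes_in_seg` (`[1748, 1749)`), `next_seg` (`[1752, 1756)`). -/
def muWins : Wins := [(48, 72), (1488, 1492), (1748, 1749), (1752, 1756)]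

/-- `muWins` against the generated offsets. -/
example : muWins = [(Off.stb_vorbis.stream, Off.stb_vorbis.stream_end + 8),
    (Off.stb_vorbis.segment_count, Off.stb_vorbis.segment_count + 4),
    (Off.stb_vorbis.bytes_in_seg, Off.stb_vorbis.bytes_in_seg + 1),
    (Off.stb_vorbis.next_seg, Off.stb_vorbis.next_seg + 4)] := by
  simp only [voff]
  rfl

/-- **μ in two memories, at two addresses**: the windows μ reads are the same ⇒ μ is the same. Instances:
`hs.sub (by decide)` of an `ObjSame` (an allocator call does not change μ), `ObjEq.of_copied hcp (by decide)` (`*f = p`). -/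
theorem mu_transfer {mem mem' : Mem} {p f : Nat} (he : ObjEq muWins mem p mem' f) : mu mem' f = mu mem p := by
  have e1 : stb_vorbis.stream_end mem' f = stb_vorbis.stream_end mem p := by
    simp only [vacc, voff]
    exact he.u64 64 (by decide)
  have e2 : stb_vorbis.stream mem' f = stb_vorbis.stream mem p := by
    simp only [vacc, voff]
    exact he.u64 48 (by decide)
  have e3 : stb_vorbis.segment_count mem' f = stb_vorbis.segment_count mem p := by
    simp only [vacc, voff]
    exact he.i32 1488 (by decide)
  have e4 : stb_vorbis.next_seg mem' f = stb_vorbis.next_seg mem p := by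
    simp only [vacc, voff]
    exact he.i32 1752 (by decide)
  have e5 : stb_vorbis.bytes_in_seg mem' f = stb_vorbis.bytes_in_seg mem p := by
    simp only [vacc, voff]
    exact he.u8 1748 (by decide)
  rw [mu_def, mu_def, e1, e2, e3, e4, e5]

/-! ### 7. The byte reader's arithmetic (FIX 20: lengths are compared, no pointer past the end is formed)

getn and skip compute `stream_end − stream` (`sub r12, rsi` / `sub rdx, rax`: exact, by S3) and compare the sign-extended `n`
with it (signed 64-bit `cmp; jle`: both are small non-negative numbers). -/

/-- Pointer difference: `sub r12, rsi` with `r12 = addr e`, `rsi = addr s`, `s ≤ e`. -/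
theorem addr_sub_addr (a b : Nat) (h : b ≤ a) : addr a - addr b = addr (a - b) :=
  (UInt64.ofNat_sub h).symm

/-- **getn's test passed** (`n ≤ stream_end − stream`, `0 ≤ n`): the `n` bytes at `stream` end at or before `stream_end`. -/
theorem getn_fits (e s : Nat) (n : Int) (h0 : 0 ≤ n) (hle : n ≤ (e : Int) - (s : Int)) : s + n.toNat ≤ e := by
  omega

/-- **skip's clamped step**: `if (n > stream_end - stream) n = (int) (stream_end - stream);`, the number of bytes skip
advances by, for `0 ≤ n` (skip's precondition: both call sites pass a byte; a NEGATIVE `n` would step backwards, and is not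
modelled: `n.toNat`). -/
def skipLen (n : Int) (e s : Nat) : Nat := if (e : Int) - (s : Int) < n then e - s else n.toNat

/-- Both cases of `skipLen`, for `omega`. -/
theorem skipLen_cases (n : Int) (e s : Nat) :
    ((e : Int) - (s : Int) < n ∧ skipLen n e s = e - s) ∨ (n ≤ (e : Int) - (s : Int) ∧ skipLen n e s = n.toNat) := by
  unfold skipLen
  split <;> omega

/-- skip never steps past the end: the new `stream = stream + skipLen` satisfies S3 again. -/
theorem skipLen_fits (n : Int) (e s : Nat) (hS3 : s ≤ e) : s + skipLen n e s ≤ e := by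
  have h := skipLen_cases n e s
  omega

/-- skip steps at most `n` bytes (`n ∈ [0, 255]` at both call sites). -/
theorem skipLen_le (n : Int) (e s : Nat) (hS3 : s ≤ e) (h0 : 0 ≤ n) : (skipLen n e s : Int) ≤ n := by
  have h := skipLen_cases n e s
  omega

/-- `(int) (stream_end - stream)` (`mov ebp, edx; movsxd rbp, ebp`) is exact: the difference is at most `1FF000H`. -/
theorem skip_trunc32 (d : Nat) (hd : d ≤ 0x1FF000) : sint32 (d % 2 ^ 32) = (d : Int) := by
  have e : d % 2 ^ 32 = d := Nat.mod_eq_of_lt (by omega)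
  rw [e]
  have h := sint32_cases d
  omega

/-! ### 8. get_bits: the result contract, V1's arithmetic, the two-stage recursion -/

/-- **The result contract of `get_bits(f, n)`** (D-3): a 32-bit value, and `< 2^n` for `n ≤ 31`. (For `n = 32` any u32.) -/
def GetBitsResult (n z : Nat) : Prop := z < 2 ^ 32 ∧ (n ≤ 31 → z < 2 ^ n)

/-- The recursive arm's value: `first < 2^24`, `second < 2^(n−24)` ⇒ `first + second·2^24 < 2^n`. -/
theorem get_bits_combine_lt (n z1 z2 : Nat) (hn : 24 ≤ n) (h1 : z1 < 2 ^ 24) (h2 : z2 < 2 ^ (n - 24)) :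
    z1 + z2 * 2 ^ 24 < 2 ^ n := by
  have e : 2 ^ n = 2 ^ (n - 24) * 2 ^ 24 := by
    rw [← Nat.pow_add]
    congr 1
    omega
  rw [e]
  have h3 : (z2 + 1) * 2 ^ 24 ≤ 2 ^ (n - 24) * 2 ^ 24 := Nat.mul_le_mul_right _ h2
  have h4 : (z2 + 1) * 2 ^ 24 = z2 * 2 ^ 24 + 2 ^ 24 := by
    rw [Nat.add_mul, Nat.one_mul]
  omega

/-- **The result of the recursive arm** `z = get_bits(f,24); z += get_bits(f,n−24) << 24;` (`shl eax, 0x18; add eax, ebp`: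
32-bit arithmetic, hence the `% 2^32`; for `n ≤ 31` nothing is lost). -/
theorem GetBitsResult.combine (n z1 z2 : Nat) (hn : 25 ≤ n) (h1 : GetBitsResult 24 z1) (h2 : GetBitsResult (n - 24) z2) :
    GetBitsResult n ((z1 + z2 * 2 ^ 24) % 2 ^ 32) := by
  constructor
  · exact Nat.mod_lt _ (by decide)
  · intro h31
    have hz1 : z1 < 2 ^ 24 := h1.2 (by omega)
    have hz2 : z2 < 2 ^ (n - 24) := h2.2 (by omega)
    have hlt := get_bits_combine_lt n z1 z2 (by omega) hz1 hz2
    exact Nat.lt_of_le_of_lt (Nat.mod_le _ _) hlt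

/-- The 32-bit sum as the machine forms it (`(second << 24) + first`, each step modulo `2^32`) is the same number. -/
theorem get_bits_combine_machine (z1 z2 : Nat) :
    (z2 * 2 ^ 24 % 2 ^ 32 + z1) % 2 ^ 32 = (z1 + z2 * 2 ^ 24) % 2 ^ 32 := by
  omega

/-- The mask `(1 << n) − 1` of the extraction (`mov eax, 1; shl eax, cl; sub eax, 1`), `n ≤ 31`. -/
theorem mask_toNat (n : Nat) (hn : n < 32) : ((1#32 <<< n) - 1#32).toNat = 2 ^ n - 1 := by
  have hp : 2 ^ n < 2 ^ 32 := Nat.pow_lt_pow_right (by decide) hn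
  have hp1 : 1 ≤ 2 ^ n := Nat.one_le_two_pow
  have e1 : (1#32).toNat = 1 := rfl
  rw [BitVec.toNat_sub, BitVec.toNat_shiftLeft, Nat.shiftLeft_eq, e1, Nat.one_mul, Nat.mod_eq_of_lt hp]
  omega

/-- **`get_bits`' extraction `acc & ((1 << n) − 1)` is below `2^n`** (`and eax, edx` with `eax` the mask). -/
theorem mask_and_lt (x : BitVec 32) (n : Nat) (hn : n < 32) : (((1#32 <<< n) - 1#32) &&& x).toNat < 2 ^ n := by
  have hp1 : 1 ≤ 2 ^ n := Nat.one_le_two_pow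
  rw [BitVec.toNat_and, mask_toNat n hn]
  have hle : (2 ^ n - 1) &&& x.toNat ≤ 2 ^ n - 1 := Nat.and_le_left
  omega

/-- The same with the operands the other way round. -/
theorem and_mask_lt (x : BitVec 32) (n : Nat) (hn : n < 32) : (x &&& ((1#32 <<< n) - 1#32)).toNat < 2 ^ n := by
  rw [BitVec.and_comm]
  exact mask_and_lt x n hn

/-- V1 in get_bits' loop `while (valid_bits < n) { … valid_bits += 8; }`, reached only with `n ≤ 24` and `0 ≤ valid_bits`:
the new value is at most 31, and the measure `n −ℕ valid_bits` drops (at most 3 rounds). -/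
theorem V1_get_bits_loop (vb n : Int) (h0 : 0 ≤ vb) (hlt : vb < n) (hn : n ≤ 24) :
    (-1 ≤ vb + 8 ∧ vb + 8 ≤ 31) ∧ (n - (vb + 8)).toNat < (n - vb).toNat := by
  omega

/-- V1 at get_bits' extraction `valid_bits -= n`, reached with `n ≤ valid_bits`. -/
theorem V1_get_bits_take (vb n : Int) (h0 : 0 ≤ n) (hle : n ≤ vb) (h32 : vb ≤ 32) : -1 ≤ vb - n ∧ vb - n ≤ 32 := by
  omega

/-- V1 in prep_huffman's loop `do { … valid_bits += 8; } while (valid_bits <= 24)` (FIX 21: entered only with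
`0 ≤ valid_bits ≤ 24`): the new value is at most 32, the measure `25 −ℕ valid_bits` drops (at most 4 rounds). -/
theorem V1_prep_huffman_loop (vb : Int) (h0 : 0 ≤ vb) (hle : vb ≤ 24) :
    (-1 ≤ vb + 8 ∧ vb + 8 ≤ 32) ∧ (25 - (vb + 8)).toNat < (25 - vb).toNat := by
  omega

/-- **What every packet-reading primitive guarantees between its entry memory `mem` and its exit memory `mem'`**: `Bits` is
kept and μ has not increased. (Footprint and return value are the contract's own.) -/
structure ReaderPost (Blk : Block → Prop) (len : Nat) (mem mem' : Mem) (f : Nat) : Prop where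
  bits : Bits Blk len mem' f
  mu_le : mu mem' f ≤ mu mem f

/-- Nothing happened. -/
theorem ReaderPost.refl {Blk : Block → Prop} {len : Nat} {mem : Mem} {f : Nat} (h : Bits Blk len mem f) :
    ReaderPost Blk len mem mem f :=
  ⟨h, Nat.le_refl _⟩

/-- One reader after another (loops of get8_packet_raw: get_bits, prep_huffman, flush_packet). -/
theorem ReaderPost.trans {Blk : Block → Prop} {len : Nat} {mem mem1 mem2 : Mem} {f : Nat}
    (h1 : ReaderPost Blk len mem mem1 f) (h2 : ReaderPost Blk len mem1 mem2 f) : ReaderPost Blk len mem mem2 f :=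
  ⟨h2.bits, Nat.le_trans h2.mu_le h1.mu_le⟩

/-- **The postcondition of `get_bits(f, n)`** (DECISIONS D-3; CONTRACTS entry 50), entry memory `mem`, exit memory `mem'`,
result `z`. NOT in it, on purpose: "0 for ever after an end of packet" (withdrawn by D-3). -/
structure GetBitsPost (Blk : Block → Prop) (len : Nat) (mem mem' : Mem) (f n z : Nat) : Prop where
  /-- `Bits f` kept (V1 in particular). -/
  bits : Bits Blk len mem' f
  /-- `z < 2^n` for `n ≤ 31`; any u32 for `n = 32`. -/
  result : GetBitsResult n z
  /-- μ not increased. -/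
  mu_le : mu mem' f ≤ mu mem f
  /-- `valid_bits < 0` on entry: result 0 and NOTHING written (here: the two values the recursion needs). -/
  eop : stb_vorbis.valid_bits mem f < 0 →
    z = 0 ∧ stb_vorbis.valid_bits mem' f = stb_vorbis.valid_bits mem f ∧ mu mem' f = mu mem f
  /-- PROGRESS: from `valid_bits = 0`, `n ≥ 1`: end of packet (result 0, `valid_bits′ = −1`), or μ strictly smaller. -/
  progress : stb_vorbis.valid_bits mem f = 0 → 1 ≤ n →
    (z = 0 ∧ stb_vorbis.valid_bits mem' f = -1) ∨ mu mem' f < mu mem f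

/-- The part common to all readers. -/
theorem GetBitsPost.reader {Blk : Block → Prop} {len : Nat} {mem mem' : Mem} {f n z : Nat}
    (h : GetBitsPost Blk len mem mem' f n z) : ReaderPost Blk len mem mem' f :=
  ⟨h.bits, h.mu_le⟩

/-- **THE TWO-STAGE RECURSION.** Stage 1 proves the contract for `n ≤ 24` (the recursive arm is unreachable: `cmp r12d, 0x18;
jg`). Stage 2 proves it for `n ≤ 32` with stage 1 as the hypothesis for BOTH recursive calls — arguments 24 and
`n − 24 ∈ [1, 8]` — and this lemma puts the two posts together. The arm is entered with `0 ≤ valid_bits < n` and `24 < n`;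
`mem1` is the memory between the calls. -/
theorem GetBitsPost.combine {Blk : Block → Prop} {len : Nat} {mem mem1 mem2 : Mem} {f n z1 z2 : Nat}
    (h1 : GetBitsPost Blk len mem mem1 f 24 z1) (h2 : GetBitsPost Blk len mem1 mem2 f (n - 24) z2)
    (hn : 25 ≤ n) (hvb : 0 ≤ stb_vorbis.valid_bits mem f) :
    GetBitsPost Blk len mem mem2 f n ((z1 + z2 * 2 ^ 24) % 2 ^ 32) := by
  constructor
  · exact h2.bits
  · exact GetBitsResult.combine n z1 z2 hn h1.result h2.result
  · exact Nat.le_trans h2.mu_le h1.mu_le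
  · intro hneg
    omega
  · intro h0 hn1
    cases h1.progress h0 (by omega) with
    | inl hend =>
      have hneg : stb_vorbis.valid_bits mem1 f < 0 := by
        rw [hend.2]
        omega
      have h2e := h2.eop hneg
      left
      constructor
      · rw [hend.1, h2e.1]
      · rw [h2e.2.1, hend.2]
    | inr hlt =>
      right
      exact Nat.lt_of_le_of_lt h2.mu_le hlt

end Vorbis
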